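-- pv_equiv track=rewrite | github.com/DongYun666/leetcode | 剑指 Offer 13.机器人的运动范围.py | movingCount3
-- ===== SOURCE A (Python) =====
-- def movingCount3(m: int, n: int, k: int) -> int:
--     visit = [(0,0)]
--     query = [(0,0)]  ##创建队列
--     while query:
--         temp = query.pop()
--         x,y = temp[0],temp[1]
--         if (x+1)<m and y<n and (x+1,y) not in visit and (x+1) // 10 + (x+1) % 10 + y // 10 + y % 10 <= k:
--             query.append((x+1,y))
--             visit.append((x+1,y))
--         if x<m and (y+1)<n and (x,y+1) not in visit and x // 10 + x % 10 + (y+1) // 10 + (y+1) % 10 <= k: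
--             query.append((x,y+1))
--             visit.append((x,y+1))
--     return len(visit)
-- ===== SOURCE B (Python) =====
-- def movingCount3(m: int, n: int, k: int) -> int:
--     # Row-major dynamic programming instead of a DFS worklist: a cell is reachable
--     # iff its digit condition holds and its upper or left neighbour is reachable.
--     # A row scan stops once it is past the previous row's rightmost reachable
--     # column with a dead left chain; the whole scan stops at the first empty row.
--     reach = {(0, 0)}
--     maxprev = 0        # no cell of the previous row lies right of this column
--     i = 0
--     while i < m:
--         maxcur = -1    # rightmost reachable column found so far in row i
--         j = 0
--         while j < n:
--             if i == 0 and j == 0: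
--                 maxcur = 0
--             elif (i // 10 + i % 10) + (j // 10 + j % 10) <= k and \
--                     ((i - 1, j) in reach or (i, j - 1) in reach):
--                 reach.add((i, j))
--                 maxcur = j
--             elif j >= maxprev:
--                 break
--             j += 1
--         if maxcur < 0:
--             break
--         maxprev = maxcur
--         i += 1
--     return len(reach)
-- ===== Notes on version B (the rewrite author's own statement) =====
-- stated objective: faster
-- what changed: Replaces the DFS worklist with linear list-membership tests by a row-major dynamic program over a hash set: each cell is marked reachable iff its digit condition holds and its upper or left neighbour is already reachable, with (0,0) seeded unconditionally.
import Mathlib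
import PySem

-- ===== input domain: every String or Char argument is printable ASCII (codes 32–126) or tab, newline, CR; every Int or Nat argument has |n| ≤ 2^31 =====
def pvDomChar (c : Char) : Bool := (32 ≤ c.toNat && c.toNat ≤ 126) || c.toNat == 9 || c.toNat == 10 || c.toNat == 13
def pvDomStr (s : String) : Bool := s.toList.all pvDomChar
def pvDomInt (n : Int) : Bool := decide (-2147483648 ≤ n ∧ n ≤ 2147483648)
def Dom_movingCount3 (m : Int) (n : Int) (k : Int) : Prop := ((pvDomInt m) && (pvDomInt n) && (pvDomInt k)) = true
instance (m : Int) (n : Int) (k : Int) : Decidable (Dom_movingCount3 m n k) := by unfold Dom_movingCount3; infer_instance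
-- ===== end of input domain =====

-- B replaces A's DFS worklist (with linear list-membership tests) by a row-major
-- dynamic program over a set: faster (measured), same return value everywhere.

-- ===== PORT A =====
-- A's while-loop over the worklist. The worklist is kept top-first (the list head is
-- Python's query[-1], which `query.pop()` removes); fuel only makes the recursion
-- structural — the chosen fuel is proved sufficient, so it never runs out.
def movingCountLoopA (m n k : Int) : Nat → List (Int × Int) → List (Int × Int) → List (Int × Int)
  | 0, visit, _ => visit
  | _ + 1, visit, [] => visit
  | fuel + 1, visit, (x, y) :: rest =>
    let s1 :=
      if x + 1 < m ∧ y < n ∧ (x + 1, y) ∉ visit ∧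
          PySem.Int.floordiv (x + 1) 10 + PySem.Int.mod (x + 1) 10 +
            PySem.Int.floordiv y 10 + PySem.Int.mod y 10 ≤ k then
        (visit ++ [(x + 1, y)], (x + 1, y) :: rest)
      else (visit, rest)
    let s2 :=
      if x < m ∧ y + 1 < n ∧ (x, y + 1) ∉ s1.1 ∧
          PySem.Int.floordiv x 10 + PySem.Int.mod x 10 +
            PySem.Int.floordiv (y + 1) 10 + PySem.Int.mod (y + 1) 10 ≤ k then
        (s1.1 ++ [(x, y + 1)], (x, y + 1) :: s1.2)
      else s1
    movingCountLoopA m n k fuel s2.1 s2.2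

def movingCount3 (m : Int) (n : Int) (k : Int) : Int :=
  let visit : List (Int × Int) := [(0, 0)]
  let query : List (Int × Int) := [(0, 0)]
  PySem.List.len (movingCountLoopA m n k (3 * (m.toNat * n.toNat + 1) + 1) visit query)

-- ===== PORT B =====
-- Source B's inner `while j < n` loop: fuel counts the remaining columns (j + fuel = n),
-- so fuel 0 is exactly loop exit; the third branch is the `break`.
def movingCountAltRow (k i maxprev : Int) : Nat → Int → Int → PySem.Set (Int × Int) → PySem.Set (Int × Int) × Int
  | 0, _, maxcur, reach => (reach, maxcur)
  | cnt + 1, j, maxcur, reach =>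
    if i = 0 ∧ j = 0 then
      movingCountAltRow k i maxprev cnt (j + 1) 0 reach
    else if (PySem.Int.floordiv i 10 + PySem.Int.mod i 10) +
          (PySem.Int.floordiv j 10 + PySem.Int.mod j 10) ≤ k ∧
          ((i - 1, j) ∈ reach ∨ (i, j - 1) ∈ reach) then
      movingCountAltRow k i maxprev cnt (j + 1) j (PySem.Set.add reach (i, j))
    else if maxprev ≤ j then
      (reach, maxcur)
    else
      movingCountAltRow k i maxprev cnt (j + 1) maxcur reach

-- Source B's outer `while i < m` loop (fuel counts remaining rows); the if is the
-- `if maxcur < 0: break`.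
def movingCountAltOuter (n k : Int) : Nat → Int → Int → PySem.Set (Int × Int) → PySem.Set (Int × Int)
  | 0, _, _, reach => reach
  | cnt + 1, i, maxprev, reach =>
    let r := movingCountAltRow k i maxprev n.toNat 0 (-1) reach
    if r.2 < 0 then r.1
    else movingCountAltOuter n k cnt (i + 1) r.2 r.1

def movingCount3_alt (m : Int) (n : Int) (k : Int) : Int :=
  PySem.Set.len (movingCountAltOuter n k m.toNat 0 0 (PySem.Set.ofList [(0, 0)]))

-- ===== PRECONDITION & SPEC =====
def Spec_movingCount3 (m : Int) (n : Int) (k : Int) (out : Int) : Prop := out = movingCount3_alt m n k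
instance (m : Int) (n : Int) (k : Int) (out : Int) : Decidable (Spec_movingCount3 m n k out) := by unfold Spec_movingCount3; infer_instance

-- ===== CLAIM (what is proved, stated in full; the proofs are below) =====
def Claim_equal_movingCount3 : Prop := ∀ (m : Int) (n : Int) (k : Int), Dom_movingCount3 m n k → Spec_movingCount3 m n k (movingCount3 m n k)

-- ===== LEMMAS AND PROOFS =====

-- The reachability relation both programs compute: cells reachable from (0,0) by
-- +1 steps whose target passes A's digit test (the origin itself is never tested).
inductive Reach (m n k : Int) : Int → Int → Prop
  | origin : Reach m n k 0 0
  | right {x y : Int} : Reach m n k x y → x + 1 < m → y < n →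
      PySem.Int.floordiv (x + 1) 10 + PySem.Int.mod (x + 1) 10 +
        PySem.Int.floordiv y 10 + PySem.Int.mod y 10 ≤ k →
      Reach m n k (x + 1) y
  | down {x y : Int} : Reach m n k x y → x < m → y + 1 < n →
      PySem.Int.floordiv x 10 + PySem.Int.mod x 10 +
        PySem.Int.floordiv (y + 1) 10 + PySem.Int.mod (y + 1) 10 ≤ k →
      Reach m n k x (y + 1)

lemma reach_nonneg {m n k x y : Int} (h : Reach m n k x y) : 0 ≤ x ∧ 0 ≤ y := by
  induction h with
  | origin => omega
  | right _ _ _ _ ih => omega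
  | down _ _ _ _ ih => omega

lemma reach_grid {m n k x y : Int} (h : Reach m n k x y) :
    (x, y) = ((0 : Int), (0 : Int)) ∨ (0 ≤ x ∧ x < m ∧ 0 ≤ y ∧ y < n) := by
  induction h with
  | origin => left; rfl
  | @right x y h hx hy _ ih =>
    rcases reach_nonneg h with ⟨hx0, hy0⟩
    rcases ih with h0 | h0
    · right; refine ⟨by omega, hx, by omega, ?_⟩
      have : y = 0 := by simpa using congrArg Prod.snd h0
      omega
    · right; omega
  | @down x y h hx hy _ ih =>
    rcases reach_nonneg h with ⟨hx0, hy0⟩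
    rcases ih with h0 | h0
    · right; refine ⟨by omega, ?_, by omega, hy⟩
      have : x = 0 := by simpa using congrArg Prod.fst h0
      omega
    · right; omega

lemma reach_inversion {m n k x y : Int} (h : Reach m n k x y) (h0 : ¬(x = 0 ∧ y = 0)) :
    PySem.Int.floordiv x 10 + PySem.Int.mod x 10 +
      PySem.Int.floordiv y 10 + PySem.Int.mod y 10 ≤ k ∧ x < m ∧ y < n ∧
      (Reach m n k (x - 1) y ∨ Reach m n k x (y - 1)) := by
  induction h with
  | origin => exact absurd ⟨rfl, rfl⟩ h0
  | @right a b h ha hb hk _ =>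
    refine ⟨hk, by omega, hb, Or.inl ?_⟩
    have e : a + 1 - 1 = a := by omega
    rwa [e]
  | @down a b h ha hb hk _ =>
    refine ⟨hk, ha, by omega, Or.inr ?_⟩
    have e : b + 1 - 1 = b := by omega
    rwa [e]

-- the finite universe visit lives in, used only for the termination bound
noncomputable def SFin (m n : Int) : Finset (Int × Int) :=
  insert (0, 0) (Finset.Ico 0 m ×ˢ Finset.Ico 0 n)

lemma reach_mem_SFin {m n k x y : Int} (h : Reach m n k x y) : (x, y) ∈ SFin m n := by
  rcases reach_grid h with h0 | h0
  · rw [h0]; exact Finset.mem_insert_self _ _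
  · exact Finset.mem_insert_of_mem (by
      simp only [Finset.mem_product, Finset.mem_Ico]; exact ⟨⟨h0.1, h0.2.1⟩, h0.2.2.1, h0.2.2.2⟩)

lemma card_SFin (m n : Int) : (SFin m n).card ≤ m.toNat * n.toNat + 1 := by
  have hc : (Finset.Ico (0 : Int) m ×ˢ Finset.Ico (0 : Int) n).card = m.toNat * n.toNat := by
    rw [Finset.card_product, Int.card_Ico, Int.card_Ico]
    simp
  unfold SFin
  have := Finset.card_insert_le ((0, 0) : Int × Int) (Finset.Ico 0 m ×ˢ Finset.Ico 0 n)
  omega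

-- A's loop invariant
def InvA (m n k : Int) (visit query : List (Int × Int)) : Prop :=
  visit.Nodup ∧ (0, 0) ∈ visit ∧
  (∀ p ∈ visit, Reach m n k p.1 p.2) ∧
  (∀ p ∈ query, p ∈ visit) ∧
  (∀ x y, (x, y) ∈ visit → (x, y) ∉ query →
    (x + 1 < m → y < n →
      PySem.Int.floordiv (x + 1) 10 + PySem.Int.mod (x + 1) 10 +
        PySem.Int.floordiv y 10 + PySem.Int.mod y 10 ≤ k → (x + 1, y) ∈ visit) ∧
    (x < m → y + 1 < n →
      PySem.Int.floordiv x 10 + PySem.Int.mod x 10 +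
        PySem.Int.floordiv (y + 1) 10 + PySem.Int.mod (y + 1) 10 ≤ k → (x, y + 1) ∈ visit))

lemma visit_length_le {m n k : Int} {visit query : List (Int × Int)}
    (h : InvA m n k visit query) : visit.length ≤ (SFin m n).card := by
  obtain ⟨hnd, _, hsound, _, _⟩ := h
  have hsub : visit.toFinset ⊆ SFin m n := by
    intro p hp
    rw [List.mem_toFinset] at hp
    have := hsound p hp
    exact (by simpa using reach_mem_SFin this)
  calc visit.length = visit.toFinset.card := (List.toFinset_card_of_nodup hnd).symm
    _ ≤ (SFin m n).card := Finset.card_le_card hsub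

lemma pvFst {α β : Type} (a : α) (b : β) : (Prod.mk a b).1 = a := rfl

lemma pvSnd {α β : Type} (a : α) (b : β) : (Prod.mk a b).2 = b := rfl

-- mid-step invariant: the popped cell (x, y) is no longer in the queue and its own
-- closure obligations are not yet discharged
def MidInvA (m n k x y : Int) (visit query : List (Int × Int)) : Prop :=
  visit.Nodup ∧ (0, 0) ∈ visit ∧ (∀ p ∈ visit, Reach m n k p.1 p.2) ∧
  (∀ p ∈ query, p ∈ visit) ∧ (x, y) ∈ visit ∧
  (∀ u v, (u, v) ∈ visit → (u, v) ∉ query → ¬(u = x ∧ v = y) →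
    (u + 1 < m → v < n →
      PySem.Int.floordiv (u + 1) 10 + PySem.Int.mod (u + 1) 10 +
        PySem.Int.floordiv v 10 + PySem.Int.mod v 10 ≤ k → (u + 1, v) ∈ visit) ∧
    (u < m → v + 1 < n →
      PySem.Int.floordiv u 10 + PySem.Int.mod u 10 +
        PySem.Int.floordiv (v + 1) 10 + PySem.Int.mod (v + 1) 10 ≤ k → (u, v + 1) ∈ visit))

lemma midInvA_of_invA {m n k x y : Int} {visit rest : List (Int × Int)}
    (h : InvA m n k visit ((x, y) :: rest)) : MidInvA m n k x y visit rest := by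
  obtain ⟨hnd, h0, hsound, hq, hcl⟩ := h
  refine ⟨hnd, h0, hsound, fun p hp => hq p (List.mem_cons_of_mem _ hp),
    hq (x, y) (List.mem_cons_self), ?_⟩
  intro u v huv hnq hne
  refine hcl u v huv ?_
  intro hmem
  rcases List.mem_cons.1 hmem with he | he
  · exact hne ⟨by simpa using congrArg Prod.fst he, by simpa using congrArg Prod.snd he⟩
  · exact hnq he

lemma midInvA_add {m n k x y a b : Int} {visit query : List (Int × Int)}
    (h : MidInvA m n k x y visit query) (hnotin : (a, b) ∉ visit)
    (hR : Reach m n k a b) :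
    MidInvA m n k x y (visit ++ [(a, b)]) ((a, b) :: query) := by
  obtain ⟨hnd, h0, hsound, hq, hxy, hcl⟩ := h
  refine ⟨?_, List.mem_append_left _ h0, ?_, ?_, List.mem_append_left _ hxy, ?_⟩
  · simp [List.nodup_append, hnd]
    rintro u v huv rfl rfl
    exact hnotin huv
  · intro p hp
    rcases List.mem_append.1 hp with hp | hp
    · exact hsound p hp
    · have : p = (a, b) := by simpa using hp
      subst this; exact hR
  · intro p hp
    rcases List.mem_cons.1 hp with hp | hp
    · exact hp ▸ List.mem_append_right _ (by simp)
    · exact List.mem_append_left _ (hq p hp)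
  · intro u v huv hnq hne
    have hnq' : (u, v) ∉ query := fun hc => hnq (List.mem_cons_of_mem _ hc)
    have huv' : (u, v) ∈ visit := by
      rcases List.mem_append.1 huv with hp | hp
      · exact hp
      · exfalso
        exact hnq (by simp [show ((u : Int), (v : Int)) = (a, b) by simpa using hp])
    obtain ⟨hr, hd⟩ := hcl u v huv' hnq' hne
    exact ⟨fun h1 h2 h3 => List.mem_append_left _ (hr h1 h2 h3),
      fun h1 h2 h3 => List.mem_append_left _ (hd h1 h2 h3)⟩

lemma invA_of_midInvA {m n k x y : Int} {visit query : List (Int × Int)}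
    (h : MidInvA m n k x y visit query)
    (hcr : x + 1 < m → y < n →
      PySem.Int.floordiv (x + 1) 10 + PySem.Int.mod (x + 1) 10 +
        PySem.Int.floordiv y 10 + PySem.Int.mod y 10 ≤ k → (x + 1, y) ∈ visit)
    (hcd : x < m → y + 1 < n →
      PySem.Int.floordiv x 10 + PySem.Int.mod x 10 +
        PySem.Int.floordiv (y + 1) 10 + PySem.Int.mod (y + 1) 10 ≤ k → (x, y + 1) ∈ visit) :
    InvA m n k visit query := by
  obtain ⟨hnd, h0, hsound, hq, hxy, hcl⟩ := h
  refine ⟨hnd, h0, hsound, hq, ?_⟩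
  intro u v huv hnq
  by_cases hne : u = x ∧ v = y
  · obtain ⟨rfl, rfl⟩ := hne
    exact ⟨hcr, hcd⟩
  · exact hcl u v huv hnq hne

lemma loopA_spec (m n k : Int) :
    ∀ (fuel : Nat) (visit query : List (Int × Int)), InvA m n k visit query →
      3 * ((SFin m n).card - visit.length) + query.length ≤ fuel →
      InvA m n k (movingCountLoopA m n k fuel visit query) [] := by
  intro fuel
  induction fuel with
  | zero =>
    intro visit query hInv hfuel
    have hq : query = [] := List.eq_nil_of_length_eq_zero (by omega)
    subst hq
    simpa [movingCountLoopA] using hInv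
  | succ fuel ih =>
    intro visit query hInv hfuel
    match query with
    | [] => simpa [movingCountLoopA] using hInv
    | (x, y) :: rest =>
      simp only [movingCountLoopA]
      have hmid := midInvA_of_invA hInv
      have hRxy : Reach m n k x y := hInv.2.2.1 (x, y) (hInv.2.2.2.1 (x, y) List.mem_cons_self)
      have hfuel' : 3 * ((SFin m n).card - visit.length) + (rest.length + 1) ≤ fuel + 1 := by
        simpa using hfuel
      by_cases hc1 : x + 1 < m ∧ y < n ∧ (x + 1, y) ∉ visit ∧
          PySem.Int.floordiv (x + 1) 10 + PySem.Int.mod (x + 1) 10 +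
            PySem.Int.floordiv y 10 + PySem.Int.mod y 10 ≤ k
      · rw [if_pos hc1]
        simp only [pvFst, pvSnd]
        have hmid1 := midInvA_add hmid hc1.2.2.1
          (Reach.right hRxy hc1.1 hc1.2.1 hc1.2.2.2)
        by_cases hc2 : x < m ∧ y + 1 < n ∧ (x, y + 1) ∉ visit ++ [(x + 1, y)] ∧
            PySem.Int.floordiv x 10 + PySem.Int.mod x 10 +
              PySem.Int.floordiv (y + 1) 10 + PySem.Int.mod (y + 1) 10 ≤ k
        · rw [if_pos hc2]
          simp only [pvFst, pvSnd]
          have hmid2 := midInvA_add hmid1 hc2.2.2.1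
            (Reach.down hRxy hc2.1 hc2.2.1 hc2.2.2.2)
          have hInv2 := invA_of_midInvA hmid2
            (fun _ _ _ => by simp)
            (fun _ _ _ => by simp)
          have hlen := visit_length_le hInv2
          try simp only [pvFst, pvSnd]
          refine ih _ _ hInv2 ?_
          simp only [List.length_append, List.length_cons] at hlen ⊢
          omega
        · rw [if_neg hc2]
          simp only [pvFst, pvSnd]
          have hInv2 := invA_of_midInvA hmid1
            (fun _ _ _ => by simp)
            (fun h1 h2 h3 => by
              by_cases hmem2 : (x, y + 1) ∈ visit ++ [(x + 1, y)]
              · exact hmem2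
              · exact absurd ⟨h1, h2, hmem2, h3⟩ hc2)
          have hlen := visit_length_le hInv2
          try simp only [pvFst, pvSnd]
          refine ih _ _ hInv2 ?_
          simp only [List.length_append, List.length_cons] at hlen ⊢
          omega
      · rw [if_neg hc1]
        simp only [pvFst, pvSnd]
        by_cases hc2 : x < m ∧ y + 1 < n ∧ (x, y + 1) ∉ visit ∧
            PySem.Int.floordiv x 10 + PySem.Int.mod x 10 +
              PySem.Int.floordiv (y + 1) 10 + PySem.Int.mod (y + 1) 10 ≤ k
        · rw [if_pos hc2]
          simp only [pvFst, pvSnd]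
          have hmid1 := midInvA_add hmid hc2.2.2.1
            (Reach.down hRxy hc2.1 hc2.2.1 hc2.2.2.2)
          have hInv2 := invA_of_midInvA hmid1
            (fun h1 h2 h3 => by
              by_cases hmem1 : (x + 1, y) ∈ visit
              · exact List.mem_append_left _ hmem1
              · exact absurd ⟨h1, h2, hmem1, h3⟩ hc1)
            (fun _ _ _ => by simp)
          have hlen := visit_length_le hInv2
          try simp only [pvFst, pvSnd]
          refine ih _ _ hInv2 ?_
          simp only [List.length_append, List.length_cons] at hlen ⊢
          omega
        · rw [if_neg hc2]
          have hInv2 := invA_of_midInvA hmid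
            (fun h1 h2 h3 => by
              by_cases hmem1 : (x + 1, y) ∈ visit
              · exact hmem1
              · exact absurd ⟨h1, h2, hmem1, h3⟩ hc1)
            (fun h1 h2 h3 => by
              by_cases hmem2 : (x, y + 1) ∈ visit
              · exact hmem2
              · exact absurd ⟨h1, h2, hmem2, h3⟩ hc2)
          try simp only [pvFst, pvSnd]
          refine ih _ _ hInv2 ?_
          omega

lemma invA_final_mem {m n k : Int} {R : List (Int × Int)} (h : InvA m n k R []) :
    ∀ p : Int × Int, p ∈ R ↔ Reach m n k p.1 p.2 := by
  obtain ⟨hnd, h0, hsound, _, hclosed⟩ := h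
  intro p
  constructor
  · exact hsound p
  · intro hr
    have : ∀ x y, Reach m n k x y → (x, y) ∈ R := by
      intro x y hxy
      induction hxy with
      | origin => exact h0
      | right h hx hy hk ih => exact ((hclosed _ _ ih (by simp)).1 hx hy hk)
      | down h hx hy hk ih => exact ((hclosed _ _ ih (by simp)).2 hx hy hk)
    simpa using this p.1 p.2 hr

-- B's invariant: after processing the row-major prefix up to (i, j) the set holds
-- exactly (0,0) and the reachable processed cells.
def InvB (m n k i j : Int) (s : List (Int × Int)) : Prop :=
  s.Nodup ∧ ∀ p : Int × Int,
    p ∈ s ↔ (p = (0, 0) ∨ (Reach m n k p.1 p.2 ∧ (p.1 < i ∨ (p.1 = i ∧ p.2 < j))))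

lemma invB_congr (m n k i j i' j' : Int) (s : List (Int × Int)) (h : InvB m n k i j s)
    (hiff : ∀ x y : Int, Reach m n k x y → ¬(x = 0 ∧ y = 0) →
      ((x < i ∨ (x = i ∧ y < j)) ↔ (x < i' ∨ (x = i' ∧ y < j')))) :
    InvB m n k i' j' s := by
  obtain ⟨hnd, hmem⟩ := h
  refine ⟨hnd, fun p => ?_⟩
  rw [hmem]
  obtain ⟨a, b⟩ := p
  by_cases h0 : (a, b) = ((0 : Int), (0 : Int))
  · simp [h0]
  · have h0' : ¬(a = 0 ∧ b = 0) := by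
      intro hab; exact h0 (by simp [hab.1, hab.2])
    constructor
    · rintro (h | ⟨hr, hpre⟩)
      · exact Or.inl h
      · exact Or.inr ⟨hr, (hiff a b hr h0').1 hpre⟩
    · rintro (h | ⟨hr, hpre⟩)
      · exact Or.inl h
      · exact Or.inr ⟨hr, (hiff a b hr h0').2 hpre⟩

lemma stepB (m n k i j : Int) (him : i < m) (hjn : j < n)
    (s : PySem.Set (Int × Int)) (h : InvB m n k i j s) :
    InvB m n k i (j + 1)
      (if i = 0 ∧ j = 0 then s
       else if (PySem.Int.floordiv i 10 + PySem.Int.mod i 10) +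
              (PySem.Int.floordiv j 10 + PySem.Int.mod j 10) ≤ k ∧
              ((i - 1, j) ∈ s ∨ (i, j - 1) ∈ s) then
         PySem.Set.add s (i, j)
       else s) := by
  obtain ⟨hnd, hmem⟩ := h
  have hmem_reach : ∀ a b : Int, ((a : Int), (b : Int)) ∈ s → Reach m n k a b := by
    intro a b hab
    rcases (hmem (a, b)).1 hab with h0 | ⟨hr, _⟩
    · have ha : a = 0 := by simpa using congrArg Prod.fst h0
      have hb : b = 0 := by simpa using congrArg Prod.snd h0
      subst ha; subst hb; exact Reach.origin
    · exact hr
  by_cases h00 : i = 0 ∧ j = 0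
  · rw [if_pos h00]
    refine invB_congr m n k i j i (j + 1) s ⟨hnd, hmem⟩ ?_
    intro x y hr hxy0
    rcases reach_nonneg hr with ⟨hx0, hy0⟩
    constructor
    · intro hp; rcases hp with hp | hp
      · exact Or.inl hp
      · exact Or.inr ⟨hp.1, by omega⟩
    · intro hp; rcases hp with hp | hp
      · exact Or.inl hp
      · exfalso; omega
  · rw [if_neg h00]
    have ei : i - 1 + 1 = i := by omega
    have ej : j - 1 + 1 = j := by omega
    by_cases hc : (PySem.Int.floordiv i 10 + PySem.Int.mod i 10) +
        (PySem.Int.floordiv j 10 + PySem.Int.mod j 10) ≤ k ∧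
        ((i - 1, j) ∈ s ∨ (i, j - 1) ∈ s)
    · rw [if_pos hc]
      obtain ⟨hdk, hnb⟩ := hc
      have hRij : Reach m n k i j := by
        rcases hnb with hnb | hnb
        · have hr : Reach m n k (i - 1) j := hmem_reach _ _ hnb
          have := Reach.right hr (by omega) hjn (by rw [ei]; omega)
          rwa [ei] at this
        · have hr : Reach m n k i (j - 1) := hmem_reach _ _ hnb
          have := Reach.down hr him (by omega) (by rw [ej]; omega)
          rwa [ej] at this
      refine ⟨PySem.Set.nodup_add _ _ hnd, fun p => ?_⟩
      rw [PySem.Set.mem_add]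
      constructor
      · rintro (hp | hp)
        · rcases (hmem p).1 hp with h0 | ⟨hr, hpre⟩
          · exact Or.inl h0
          · exact Or.inr ⟨hr, by omega⟩
        · subst hp
          exact Or.inr ⟨hRij, Or.inr ⟨rfl, show j < j + 1 by omega⟩⟩
      · rintro (h0 | ⟨hr, hpre⟩)
        · exact Or.inl ((hmem p).2 (Or.inl h0))
        · by_cases hcell : p = ((i : Int), (j : Int))
          · exact Or.inr hcell
          · refine Or.inl ((hmem p).2 (Or.inr ⟨hr, ?_⟩))
            have : ¬(p.1 = i ∧ p.2 = j) := by
              intro hpe; exact hcell (Prod.ext hpe.1 hpe.2)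
            omega
    · rw [if_neg hc]
      refine ⟨hnd, fun p => ?_⟩
      rw [hmem]
      constructor
      · rintro (h0 | ⟨hr, hpre⟩)
        · exact Or.inl h0
        · exact Or.inr ⟨hr, by omega⟩
      · rintro (h0 | ⟨hr, hpre⟩)
        · exact Or.inl h0
        · by_cases hcell : p.1 = i ∧ p.2 = j
          · exfalso
            obtain ⟨he1, he2⟩ := hcell
            rw [he1, he2] at hr
            obtain ⟨hdk', him', hjn', hnb'⟩ := reach_inversion hr (by
              intro hab; exact h00 ⟨hab.1, hab.2⟩)
            apply hc
            refine ⟨by omega, ?_⟩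
            rcases hnb' with h' | h'
            · exact Or.inl ((hmem _).2 (Or.inr ⟨h', Or.inl (show i - 1 < i by omega)⟩))
            · exact Or.inr ((hmem _).2 (Or.inr ⟨h', Or.inr ⟨rfl, show j - 1 < j by omega⟩⟩))
          · exact Or.inr ⟨hr, by omega⟩

lemma not_reach_here {m n k i j : Int} {reach : PySem.Set (Int × Int)}
    (hInv : InvB m n k i j reach) (h00 : ¬(i = 0 ∧ j = 0))
    (hc : ¬((PySem.Int.floordiv i 10 + PySem.Int.mod i 10) +
        (PySem.Int.floordiv j 10 + PySem.Int.mod j 10) ≤ k ∧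
        ((i - 1, j) ∈ reach ∨ (i, j - 1) ∈ reach))) :
    ¬Reach m n k i j := by
  intro hr
  obtain ⟨hmemnd, hmem⟩ := hInv
  obtain ⟨hdk, _, _, hnb⟩ := reach_inversion hr h00
  apply hc
  refine ⟨by omega, ?_⟩
  rcases hnb with h' | h'
  · exact Or.inl ((hmem _).2 (Or.inr ⟨h', Or.inl (show i - 1 < i by omega)⟩))
  · exact Or.inr ((hmem _).2 (Or.inr ⟨h', Or.inr ⟨rfl, show j - 1 < j by omega⟩⟩))

-- once a row's chain is dead past the previous row's reach, the rest of the row is dead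
lemma row_dead {m n k i mp j0 : Int} (hj00 : 0 ≤ j0) (hmpj : mp ≤ j0)
    (hmp : ∀ jj, mp < jj → ¬Reach m n k (i - 1) jj)
    (h0 : ¬Reach m n k i j0) :
    ∀ jj, j0 ≤ jj → ¬Reach m n k i jj := by
  have main : ∀ d : Nat, ¬Reach m n k i (j0 + d) := by
    intro d
    induction d with
    | zero => simpa using h0
    | succ c ih =>
      intro hr
      obtain ⟨_, _, _, hnb⟩ := reach_inversion hr (by
        intro hab; omega)
      rcases hnb with h' | h'
      · exact hmp _ (by omega) h'
      · exact ih (by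
          have e : j0 + (↑(c + 1) : Int) - 1 = j0 + c := by push_cast; omega
          rwa [e] at h')
  intro jj hjj
  have := main (jj - j0).toNat
  rwa [show j0 + ((jj - j0).toNat : Int) = jj by omega] at this
-- an entirely dead row makes every later row dead
lemma rows_dead {m n k i0 : Int} (hi0 : 0 ≤ i0)
    (h0 : ∀ jj, ¬Reach m n k i0 jj) :
    ∀ r jj, i0 ≤ r → ¬Reach m n k r jj := by
  have main : ∀ d : Nat, ∀ jj, ¬Reach m n k (i0 + d) jj := by
    intro d
    induction d with
    | zero => simpa using h0
    | succ c ih =>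
      have inner : ∀ e : Nat, ∀ jj : Int, jj.toNat = e → ¬Reach m n k (i0 + (c + 1 : Nat)) jj := by
        intro e
        induction e with
        | zero =>
          intro jj hjj hr
          have hjj0 : 0 ≤ jj := (reach_nonneg hr).2
          have hj0 : jj = 0 := by omega
          subst hj0
          obtain ⟨_, _, _, hnb⟩ := reach_inversion hr (by intro hab; push_cast at hab; omega)
          rcases hnb with h' | h'
          · exact ih _ (by
              have e2 : i0 + (↑(c + 1) : Int) - 1 = i0 + c := by push_cast; omega
              rwa [e2] at h')
          · exact absurd (reach_nonneg h').2 (by omega)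
        | succ f ihf =>
          intro jj hjj hr
          have hjj0 : 0 ≤ jj := (reach_nonneg hr).2
          obtain ⟨_, _, _, hnb⟩ := reach_inversion hr (by intro hab; push_cast at hab; omega)
          rcases hnb with h' | h'
          · exact ih _ (by
              have e2 : i0 + (↑(c + 1) : Int) - 1 = i0 + c := by push_cast; omega
              rwa [e2] at h')
          · exact ihf (jj - 1) (by omega) h'
      intro jj
      exact inner jj.toNat jj rfl
  intro r jj hr
  have := main (r - i0).toNat jj
  rwa [show i0 + (((r - i0).toNat : Nat) : Int) = r by omega] at this

lemma innerAlt_spec (m n k i mp : Int) (him : i < m)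
    (hMP : ∀ jj, mp < jj → ¬Reach m n k (i - 1) jj) :
    ∀ (cnt : Nat) (j mc : Int) (reach : PySem.Set (Int × Int)),
      0 ≤ j → j + cnt = n → mc < j →
      InvB m n k i j reach →
      (∀ jj, mc < jj → jj < j → ¬(i = 0 ∧ jj = 0) → ¬Reach m n k i jj) →
      (i = 0 → 0 < j → 0 ≤ mc) →
      InvB m n k i n (movingCountAltRow k i mp cnt j mc reach).1 ∧
      (∀ jj, (movingCountAltRow k i mp cnt j mc reach).2 < jj → ¬(i = 0 ∧ jj = 0) →
        ¬Reach m n k i jj) ∧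
      (i = 0 → (0 < j ∨ 0 < cnt) → 0 ≤ (movingCountAltRow k i mp cnt j mc reach).2) := by
  intro cnt
  induction cnt with
  | zero =>
    intro j mc reach hj0 hcnt hmcj hInv hrange hpos
    have hjn : j = n := by push_cast at hcnt; omega
    subst hjn
    simp only [movingCountAltRow]
    refine ⟨hInv, ?_, fun h0 hd => hpos h0 (by rcases hd with hd | hd; exact hd; omega)⟩
    intro jj hjj hguard hr
    by_cases hjn' : jj < j
    · exact hrange jj hjj hjn' hguard hr
    · rcases reach_grid hr with h | h
      · exact hguard ⟨by simpa using congrArg Prod.fst h, by simpa using congrArg Prod.snd h⟩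
      · omega
  | succ c ih =>
    intro j mc reach hj0 hcnt hmcj hInv hrange hpos
    have hjn : j < n := by push_cast at hcnt; omega
    have hstep := stepB m n k i j him hjn reach hInv
    simp only [movingCountAltRow]
    by_cases h00 : i = 0 ∧ j = 0
    · rw [if_pos h00]
      rw [if_pos h00] at hstep
      obtain ⟨hA, hB, hC⟩ := ih (j + 1) 0 reach (by omega) (by push_cast at hcnt ⊢; omega)
        (by omega) hstep
        (fun jj h1 h2 hguard hr => hguard ⟨h00.1, by omega⟩)
        (fun _ _ => le_refl 0)
      exact ⟨hA, hB, fun h0 _ => hC h0 (Or.inl (by omega))⟩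
    · rw [if_neg h00]
      rw [if_neg h00] at hstep
      by_cases hcond : (PySem.Int.floordiv i 10 + PySem.Int.mod i 10) +
          (PySem.Int.floordiv j 10 + PySem.Int.mod j 10) ≤ k ∧
          ((i - 1, j) ∈ reach ∨ (i, j - 1) ∈ reach)
      · rw [if_pos hcond]
        rw [if_pos hcond] at hstep
        obtain ⟨hA, hB, hC⟩ := ih (j + 1) j _ (by omega) (by push_cast at hcnt ⊢; omega)
          (by omega) hstep
          (fun jj h1 h2 hguard => absurd h2 (by omega))
          (fun _ _ => by omega)
        exact ⟨hA, hB, fun h0 _ => hC h0 (Or.inl (by omega))⟩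
      · rw [if_neg hcond]
        rw [if_neg hcond] at hstep
        have hdeadj : ¬Reach m n k i j := not_reach_here hInv h00 hcond
        by_cases hbr : mp ≤ j
        · rw [if_pos hbr]
          have htail := row_dead hj0 hbr hMP hdeadj
          constructor
          · refine invB_congr m n k i (j + 1) i n _ hstep ?_
            intro x y hr h0
            constructor
            · intro hp
              rcases hp with hp | hp
              · exact Or.inl hp
              · refine Or.inr ⟨hp.1, ?_⟩
                by_cases hyj : j ≤ y
                · exact absurd hr (hp.1 ▸ htail y hyj)
                · omega
            · intro hp
              rcases hp with hp | hp
              · exact Or.inl hp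
              · refine Or.inr ⟨hp.1, ?_⟩
                by_cases hyj : j ≤ y
                · exact absurd hr (hp.1 ▸ htail y hyj)
                · omega
          · refine ⟨?_, ?_⟩
            · intro jj hjj hguard
              by_cases hjlt : jj < j
              · exact hrange jj hjj hjlt hguard
              · exact htail jj (by omega)
            · intro h0 _
              have : 0 < j := by
                rcases (lt_or_eq_of_le hj0) with h | h
                · exact h
                · exact absurd ⟨h0, h.symm⟩ h00
              exact hpos h0 this
        · rw [if_neg hbr]
          obtain ⟨hA, hB, hC⟩ := ih (j + 1) mc reach (by omega) (by push_cast at hcnt ⊢; omega)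
            (by omega) hstep
            (fun jj h1 h2 hguard => by
              by_cases hjlt : jj < j
              · exact hrange jj h1 hjlt hguard
              · have he : jj = j := by omega
                subst he
                exact hdeadj)
            (fun h0 _ => by
              have h0j : 0 < j := by
                rcases (lt_or_eq_of_le hj0) with h | h
                · exact h
                · exact absurd ⟨h0, h.symm⟩ h00
              exact hpos h0 h0j)
          exact ⟨hA, hB, fun h0 _ => hC h0 (Or.inl (by omega))⟩

lemma outerAlt_spec (m n k : Int) (hn : 0 < n) :
    ∀ (cnt : Nat) (i mp : Int) (reach : PySem.Set (Int × Int)),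
      0 ≤ i → i + cnt = m →
      InvB m n k i 0 reach →
      (∀ jj, mp < jj → ¬Reach m n k (i - 1) jj) →
      InvB m n k m 0 (movingCountAltOuter n k cnt i mp reach) := by
  intro cnt
  induction cnt with
  | zero =>
    intro i mp reach hi0 hcnt hInv hMP
    have him : i = m := by push_cast at hcnt; omega
    subst him
    simpa [movingCountAltOuter] using hInv
  | succ c ih =>
    intro i mp reach hi0 hcnt hInv hMP
    have him : i < m := by push_cast at hcnt; omega
    obtain ⟨hInvN, hdead, hmcpos⟩ := innerAlt_spec m n k i mp him hMP n.toNat 0 (-1)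
      reach (le_refl 0) (by omega) (by omega) hInv
      (fun jj h1 h2 _ => absurd (lt_of_lt_of_le h2 (by omega)) (not_lt.2 (by omega)))
      (fun _ h => absurd h (lt_irrefl 0))
    simp only [movingCountAltOuter]
    by_cases hmc : (movingCountAltRow k i mp n.toNat 0 (-1) reach).2 < 0
    · rw [if_pos hmc]
      -- the whole row i is dead, hence all rows from i on are dead
      have hne0 : ¬(i = 0) := by
        intro h0
        exact absurd (hmcpos h0 (Or.inr (by omega))) (by omega)
      have hrowdead : ∀ jj, ¬Reach m n k i jj := by
        intro jj hr
        have hjj0 : 0 ≤ jj := (reach_nonneg hr).2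
        exact hdead jj (by omega) (fun hab => hne0 hab.1) hr
      have hall := rows_dead hi0 hrowdead
      refine invB_congr m n k i n m 0 _ hInvN ?_
      intro x y hr h0
      constructor
      · intro hp
        rcases hp with hp | hp
        · exact Or.inl (by omega)
        · exact absurd hr (hp.1 ▸ hall i y (le_refl i))
      · intro hp
        rcases hp with hp | hp
        · by_cases hxi : x < i
          · exact Or.inl hxi
          · exact absurd hr (hall x y (by omega))
        · exfalso
          exact absurd (reach_nonneg hr).2 (by omega)
    · rw [if_neg hmc]
      refine ih (i + 1) _ _ (by omega) (by push_cast at hcnt ⊢; omega) ?_ ?_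
      · refine invB_congr m n k i n (i + 1) 0 _ hInvN ?_
        intro x y hr h0
        rcases reach_grid hr with h | h
        · exact absurd ⟨by simpa using congrArg Prod.fst h, by simpa using congrArg Prod.snd h⟩ h0
        · constructor
          · intro hp; omega
          · intro hp; omega
      · intro jj hjj
        rw [show i + 1 - 1 = i by omega]
        refine hdead jj hjj ?_
        intro hab
        exact absurd hmc (by omega)

lemma altB_mem (m n k : Int) :
    ∃ R : List (Int × Int), movingCount3_alt m n k = PySem.Set.len R ∧ R.Nodup ∧
      ∀ p : Int × Int, p ∈ R ↔ Reach m n k p.1 p.2 := by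
  have hInit : InvB m n k 0 0 [((0 : Int), (0 : Int))] := by
    refine ⟨by simp, fun p => ?_⟩
    simp only [List.mem_singleton]
    constructor
    · intro h; exact Or.inl h
    · rintro (h | ⟨hr, hpre⟩)
      · exact h
      · exfalso
        rcases reach_nonneg hr with ⟨h1, h2⟩
        omega
  by_cases hmn : 0 < m ∧ 0 < n
  · have hfin := outerAlt_spec m n k hmn.2 m.toNat 0 0 [((0 : Int), (0 : Int))]
      (le_refl 0) (by omega) hInit
      (fun jj _ hr => absurd (reach_nonneg hr).1 (by omega))
    refine ⟨movingCountAltOuter n k m.toNat 0 0 [((0 : Int), (0 : Int))], rfl,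
      hfin.1, fun p => ?_⟩
    rw [hfin.2 p]
    constructor
    · rintro (h | ⟨hr, _⟩)
      · exact h ▸ Reach.origin
      · exact hr
    · intro hr
      rcases reach_grid hr with h | h
      · exact Or.inl h
      · exact Or.inr ⟨hr, Or.inl (by omega)⟩
  · -- degenerate grid: the scan stops at once and the set stays {(0,0)}
    refine ⟨[((0 : Int), (0 : Int))], ?_, by simp, fun p => ?_⟩
    · unfold movingCount3_alt
      by_cases hm : 0 < m
      · have hn0 : n.toNat = 0 := by omega
        obtain ⟨c, hc⟩ : ∃ c, m.toNat = c + 1 := ⟨m.toNat - 1, by omega⟩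
        rw [hc]
        simp only [movingCountAltOuter, hn0, movingCountAltRow]
        norm_num
        rfl
      · rw [show m.toNat = 0 by omega]
        rfl
    · simp only [List.mem_singleton]
      constructor
      · intro h; exact h ▸ Reach.origin
      · intro hr
        rcases reach_grid hr with h | h
        · exact h
        · exfalso; omega

-- ===== VERDICT (by name: the statement is the Claim_ definition above) =====
theorem movingCount3_spec : Claim_equal_movingCount3 := by
  intro m n k _hdom
  unfold Spec_movingCount3
  have hInv0 : InvA m n k [((0 : Int), (0 : Int))] [((0 : Int), (0 : Int))] := by
    refine ⟨by simp, by simp, ?_, ?_, ?_⟩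
    · intro p hp
      have hp0 : p = ((0 : Int), (0 : Int)) := by simpa using hp
      subst hp0; exact Reach.origin
    · intro p hp; exact hp
    · intro u v huv hnq
      exact absurd (by simpa using huv) (by simpa using hnq)
  have hCle := card_SFin m n
  have hfin := loopA_spec m n k (3 * (m.toNat * n.toNat + 1) + 1)
    [((0 : Int), (0 : Int))] [((0 : Int), (0 : Int))] hInv0 (by
      simp only [List.length_cons, List.length_nil]
      omega)
  have hmemA := invA_final_mem hfin
  obtain ⟨R, hReq, hRnd, hRmem⟩ := altB_mem m n k
  have hperm : (movingCountLoopA m n k (3 * (m.toNat * n.toNat + 1) + 1)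
      [((0 : Int), (0 : Int))] [((0 : Int), (0 : Int))]).Perm R :=
    (List.perm_ext_iff_of_nodup hfin.1 hRnd).2 (fun p => (hmemA p).trans (hRmem p).symm)
  show movingCount3 m n k = movingCount3_alt m n k
  rw [hReq]
  unfold movingCount3
  simp only [PySem.List.len, PySem.Set.len]
  exact_mod_cast hperm.length_eq
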